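-- pv_equiv track=rewrite | github.com/alejandro19-19/TTM-Diagnostico-inteligente | aplicacion_tesis/core/procesar_datos/primera_parte.py | convertir_primera_parte_a
-- ===== SOURCE A (Python) =====
-- def convertir_primera_parte_a(cleaned_data):
--   response = ["No","No","No","No","No","No"]
--   for i in cleaned_data:
--     if i == "N":
--       response[0] = "Si"
--     elif i == "M":
--       response[1] = "Si"
--     elif i == "T":
--       response[2] = "Si"
--     elif i == "A":
--       response[3] = "Si"
--     elif i == "O":
--       response[4] = "Si"
--     elif i == "E":
--       response[5] = "Si"
--   return response
-- ===== SOURCE B (Python) =====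
-- def convertir_primera_parte_a(cleaned_data):
--     return ["Si" if c in cleaned_data else "No" for c in ["N", "M", "T", "A", "O", "E"]]
-- ===== Notes on version B (the rewrite author's own statement) =====
-- stated objective: idiomatic
-- what changed: Replaces the single dispatch loop that mutates a preallocated six-slot list with a comprehension that builds the result by testing membership of each of the six target characters in the input.
import Mathlib
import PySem

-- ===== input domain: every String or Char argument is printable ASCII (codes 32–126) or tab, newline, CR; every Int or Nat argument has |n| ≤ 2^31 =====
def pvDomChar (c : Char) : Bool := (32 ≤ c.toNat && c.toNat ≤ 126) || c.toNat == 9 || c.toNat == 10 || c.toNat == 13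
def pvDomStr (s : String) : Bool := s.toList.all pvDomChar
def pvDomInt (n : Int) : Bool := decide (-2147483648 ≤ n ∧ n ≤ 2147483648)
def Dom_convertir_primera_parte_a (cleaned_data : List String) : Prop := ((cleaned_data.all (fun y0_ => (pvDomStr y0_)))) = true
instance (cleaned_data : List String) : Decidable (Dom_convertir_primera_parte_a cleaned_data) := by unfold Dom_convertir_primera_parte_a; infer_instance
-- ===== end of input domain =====

-- B builds the six flags by membership tests over the fixed targets instead of A's
-- mutate-in-place dispatch loop (objective: idiomatic).


-- ===== PORT A =====
-- the body of A's for-loop: in-place assignment response[k] = "Si" ported as List.set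
def stepA (response : List String) (i : String) : List String :=
  if i = "N" then response.set 0 "Si"
  else if i = "M" then response.set 1 "Si"
  else if i = "T" then response.set 2 "Si"
  else if i = "A" then response.set 3 "Si"
  else if i = "O" then response.set 4 "Si"
  else if i = "E" then response.set 5 "Si"
  else response

def convertir_primera_parte_a (cleaned_data : List String) : List String :=
  cleaned_data.foldl stepA ["No", "No", "No", "No", "No", "No"]

-- ===== PORT B =====
def convertir_primera_parte_a_alt (cleaned_data : List String) : List String :=
  ["N", "M", "T", "A", "O", "E"].map (fun c => if c ∈ cleaned_data then "Si" else "No")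

-- ===== PRECONDITION & SPEC =====
def Spec_convertir_primera_parte_a (cleaned_data : List String) (out : List String) : Prop := out = convertir_primera_parte_a_alt cleaned_data
instance (cleaned_data : List String) (out : List String) : Decidable (Spec_convertir_primera_parte_a cleaned_data out) := by unfold Spec_convertir_primera_parte_a; infer_instance

-- ===== CLAIM (what is proved, stated in full; the proofs are below) =====
def Claim_equal_convertir_primera_parte_a : Prop := ∀ (cleaned_data : List String), Dom_convertir_primera_parte_a cleaned_data → Spec_convertir_primera_parte_a cleaned_data (convertir_primera_parte_a cleaned_data)

-- ===== LEMMAS AND PROOFS =====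

-- A's fold over any six-slot state equals the per-slot membership description.
theorem foldl_stepA (xs : List String) :
    ∀ a b c d e f : String,
      List.foldl stepA [a, b, c, d, e, f] xs =
        [if "N" ∈ xs then "Si" else a,
         if "M" ∈ xs then "Si" else b,
         if "T" ∈ xs then "Si" else c,
         if "A" ∈ xs then "Si" else d,
         if "O" ∈ xs then "Si" else e,
         if "E" ∈ xs then "Si" else f] := by
  induction xs with
  | nil => intro a b c d e f; simp
  | cons x xs ih =>
    intro a b c d e f
    simp only [List.foldl_cons, stepA]
    -- keep split_ifs away from the membership ifs on the right-hand side
    generalize hR : [if "N" ∈ x :: xs then "Si" else a, if "M" ∈ x :: xs then "Si" else b,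
      if "T" ∈ x :: xs then "Si" else c, if "A" ∈ x :: xs then "Si" else d,
      if "O" ∈ x :: xs then "Si" else e, if "E" ∈ x :: xs then "Si" else f] = R
    split_ifs with h1 h2 h3 h4 h5 h6 <;> subst hR
    · subst h1; simp only [List.set]; rw [ih]; simp [List.mem_cons]
    · subst h2; simp only [List.set]; rw [ih]; simp [List.mem_cons]
    · subst h3; simp only [List.set]; rw [ih]; simp [List.mem_cons]
    · subst h4; simp only [List.set]; rw [ih]; simp [List.mem_cons]
    · subst h5; simp only [List.set]; rw [ih]; simp [List.mem_cons]
    · subst h6; simp only [List.set]; rw [ih]; simp [List.mem_cons]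
    · rw [ih]
      have n1 : ("N" : String) ≠ x := fun h => h1 h.symm
      have n2 : ("M" : String) ≠ x := fun h => h2 h.symm
      have n3 : ("T" : String) ≠ x := fun h => h3 h.symm
      have n4 : ("A" : String) ≠ x := fun h => h4 h.symm
      have n5 : ("O" : String) ≠ x := fun h => h5 h.symm
      have n6 : ("E" : String) ≠ x := fun h => h6 h.symm
      simp [List.mem_cons, n1, n2, n3, n4, n5, n6]

-- ===== VERDICT (by name: the statement is the Claim_ definition above) =====
theorem convertir_primera_parte_a_spec : Claim_equal_convertir_primera_parte_a := by
  intro cleaned_data _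
  unfold Spec_convertir_primera_parte_a convertir_primera_parte_a convertir_primera_parte_a_alt
  rw [foldl_stepA]
  simp
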